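-- pv_equiv track=rewrite | github.com/AbhiGadhave11/Python_Programming | Assign5_Q5.py | Zerox
-- ===== SOURCE A (Python) =====
-- def Zerox(no):
-- 	iDigit = 0;
-- 	iCnt = 0;
--
-- 	while(no>0):
-- 		iDigit = no % 10;
-- 		if(iDigit < 6):
-- 			iCnt = iCnt + 1;
-- 		no = int(no / 10);
--
-- 	return iCnt;
-- ===== SOURCE B (Python) =====
-- def Zerox(no):
--     if no <= 0:
--         return 0
--     return sum(1 for ch in str(no) if int(ch) < 6)
-- ===== Notes on version B (the rewrite author's own statement) =====
-- stated objective: idiomatic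
-- what changed: Replaces the digit-peeling modulo/division loop by converting the number to its decimal string once and counting characters whose digit value is below six.
import Mathlib
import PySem

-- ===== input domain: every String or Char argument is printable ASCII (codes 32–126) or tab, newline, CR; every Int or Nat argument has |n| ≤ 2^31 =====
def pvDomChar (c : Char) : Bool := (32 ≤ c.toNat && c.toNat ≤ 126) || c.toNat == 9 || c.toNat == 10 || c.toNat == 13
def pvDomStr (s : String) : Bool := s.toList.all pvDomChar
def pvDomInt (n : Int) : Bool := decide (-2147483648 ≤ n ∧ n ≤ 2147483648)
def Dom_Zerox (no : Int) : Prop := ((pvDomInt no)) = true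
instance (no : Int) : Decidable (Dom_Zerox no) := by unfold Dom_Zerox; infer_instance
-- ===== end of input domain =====

-- B converts the number to its decimal string once and counts digit characters below '6',
-- instead of A's digit-peeling modulo/division loop (objective: idiomatic; same cost).


-- ===== PORT A =====
-- the while loop, with its two mutable locals as parameters; `int(no/10)` is
-- PySem.Int.truncdiv (exact for |no| < 2^53, which Dom_Zerox guarantees)
def ZeroxGo (no iCnt : Int) : Int :=
  if h : no > 0 then
    let iDigit := PySem.Int.mod no 10
    let iCnt' := if iDigit < 6 then iCnt + 1 else iCnt
    ZeroxGo (PySem.Int.truncdiv no 10) iCnt'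
  else iCnt
termination_by no.toNat
decreasing_by
  simp only [PySem.Int.truncdiv]
  rw [Int.tdiv_eq_ediv_of_nonneg (by omega)]
  omega

def Zerox (no : Int) : Int := ZeroxGo no 0

-- ===== PORT B =====
-- int(ch) for a decimal digit character ch
def pvDigitVal (c : Char) : Nat := c.toNat - 48

def Zerox_alt (no : Int) : Int :=
  if no ≤ 0 then 0
  else ((PySem.Int.toChars no).countP (fun c => decide (pvDigitVal c < 6)) : Int)

-- ===== PRECONDITION & SPEC =====
def Spec_Zerox (no : Int) (out : Int) : Prop := out = Zerox_alt no
instance (no : Int) (out : Int) : Decidable (Spec_Zerox no out) := by unfold Spec_Zerox; infer_instance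

-- ===== CLAIM (what is proved, stated in full; the proofs are below) =====
def Claim_equal_Zerox : Prop := ∀ (no : Int), Dom_Zerox no → Spec_Zerox no (Zerox no)

-- ===== LEMMAS AND PROOFS =====

-- reference digit list: what Nat.toDigits 10 computes, in structural form
def pvDigs (m : Nat) : List Char :=
  if _h : m < 10 then [Nat.digitChar m]
  else pvDigs (m / 10) ++ [Nat.digitChar (m % 10)]
termination_by m
decreasing_by omega

lemma pv_toDigitsCore_eq : ∀ (f m : Nat) (acc : List Char), m < 10 ^ (f + 1) →
    Nat.toDigitsCore 10 (f + 1) m acc = pvDigs m ++ acc := by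
  intro f
  induction f with
  | zero =>
    intro m acc h
    have hm : m < 10 := by simpa using h
    have h0 : m / 10 = 0 := by omega
    rw [Nat.toDigitsCore, pvDigs]
    simp [h0, hm, Nat.mod_eq_of_lt hm]
  | succ f ih =>
    intro m acc h
    rw [Nat.toDigitsCore]
    by_cases hm : m < 10
    · have h0 : m / 10 = 0 := by omega
      rw [pvDigs]
      simp [h0, hm, Nat.mod_eq_of_lt hm]
    · have h0 : ¬ (m / 10 = 0) := by omega
      simp only [h0, if_false]
      have hp : (10:Nat) ^ (f+1+1) = 10 ^ (f+1) * 10 := pow_succ 10 (f+1)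
      rw [ih (m / 10) _ (by omega)]
      conv_rhs => rw [pvDigs]
      simp [hm]

lemma pv_toDigits_eq (m : Nat) : Nat.toDigits 10 m = pvDigs m := by
  have : m < 10 ^ (m + 1) := by
    calc m < m + 1 := by omega
    _ ≤ 10 ^ (m + 1) := (Nat.lt_pow_self (by norm_num)).le
  simpa using pv_toDigitsCore_eq m m [] this

lemma pv_digitChar_lt (d : Nat) (hd : d < 10) :
    (pvDigitVal (Nat.digitChar d) < 6) ↔ (d < 6) := by
  interval_cases d <;> decide

lemma pv_go_eq : ∀ (m : Nat), 0 < m → ∀ (c : Int),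
    ZeroxGo (m : Int) c = c + ((pvDigs m).countP (fun ch => decide (pvDigitVal ch < 6)) : Int) := by
  intro m
  induction m using Nat.strong_induction_on with
  | _ m ih =>
    intro hm c
    rw [ZeroxGo.eq_def]
    have hgt : (m : Int) > 0 := by exact_mod_cast hm
    have hmod : PySem.Int.mod (m : Int) 10 = ((m % 10 : Nat) : Int) := PySem.Int.mod_natCast m 10
    have hdiv : PySem.Int.truncdiv (m : Int) 10 = ((m / 10 : Nat) : Int) := by
      simp [PySem.Int.truncdiv]
    simp only [hgt, dif_pos, hmod, hdiv]
    by_cases hlt : m < 10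
    · have h10 : m / 10 = 0 := by omega
      have hmm : m % 10 = m := Nat.mod_eq_of_lt hlt
      have hiff := pv_digitChar_lt m hlt
      rw [h10, pvDigs]
      rw [Nat.cast_zero, ZeroxGo.eq_def]
      simp only [hlt, dif_pos, List.countP_cons, List.countP_nil, decide_eq_true_eq, hmm,
        (by decide : ¬ ((0:Int) > 0)), dif_neg, not_false_iff]
      by_cases h6 : m < 6
      · have hc : ((m : Int)) < 6 := by exact_mod_cast h6
        simp [hc, hiff.mpr h6]
      · have hc : ¬ ((m : Int)) < 6 := by exact_mod_cast h6
        simp [hc]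
        exact Nat.le_of_not_lt (fun hx => h6 (hiff.mp hx))
    · have hpos : 0 < m / 10 := by omega
      rw [ih (m / 10) (by omega) hpos]
      conv_rhs => rw [pvDigs]
      simp only [hlt, dif_neg, List.countP_append, List.countP_cons, List.countP_nil,
        decide_eq_true_eq, not_false_iff]
      have hiff := pv_digitChar_lt (m % 10) (Nat.mod_lt m (by omega))
      by_cases h6 : m % 10 < 6
      · have hc : ((m % 10 : Nat) : Int) < 6 := by exact_mod_cast h6
        rw [if_pos hc, if_pos (hiff.mpr h6)]
        push_cast
        ring
      · have hc : ¬ ((m % 10 : Nat) : Int) < 6 := by exact_mod_cast h6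
        rw [if_neg hc, if_neg (fun hx => h6 (hiff.mp hx))]
        push_cast
        ring

-- ===== VERDICT (by name: the statement is the Claim_ definition above) =====
theorem Zerox_spec : Claim_equal_Zerox := by
  intro no _
  unfold Spec_Zerox Zerox Zerox_alt
  by_cases hle : no ≤ 0
  · have hng : ¬ no > 0 := by omega
    rw [ZeroxGo.eq_def]
    simp [hle, hng]
  · have hpos : 0 < no := by omega
    have hm : (no.toNat : Int) = no := Int.toNat_of_nonneg (by omega)
    have hchars : PySem.Int.toChars no = pvDigs no.toNat := by
      have hneg : ¬ no < 0 := by omega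
      simp [PySem.Int.toChars, hneg, pv_toDigits_eq]
    rw [if_neg hle, hchars]
    conv_lhs => rw [← hm]
    rw [pv_go_eq no.toNat (by omega) 0]
    simp
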